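-- pv_equiv track=rewrite | github.com/razine-bensari/NaiveBayesClassificationNLP | NaiveBayesClassifier.py | getTrigrams
-- ===== SOURCE A (Python) =====
-- def getTrigrams(BOW_V0, tweet):
--     trigrams = []
--     i = 0
--     max_length = len(tweet)
--     while i < max_length:
--         if i + 2 >= max_length:
--             break
--         elif tweet[i] in BOW_V0 and tweet[i + 1] in BOW_V0 and tweet[i + 2] in BOW_V0:
--             trigrams.append([tweet[i], tweet[i + 1], tweet[i + 2]])
--         i += 1
--     return trigrams
-- ===== SOURCE B (Python) =====
-- def getTrigrams(BOW_V0, tweet):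
--     vocab = set(BOW_V0)
--     trigrams = []
--     run = 0
--     for i, tok in enumerate(tweet):
--         run = run + 1 if tok in vocab else 0
--         if run >= 3:
--             trigrams.append([tweet[i - 2], tweet[i - 1], tok])
--     return trigrams
-- ===== Notes on version B (the rewrite author's own statement) =====
-- stated objective: faster
-- what changed: Replaces the three-membership-tests-per-window loop over O(n) list membership with a single pass that builds a set of the vocabulary once and maintains a running count of consecutive in-vocabulary tokens, emitting a trigram whenever the count reaches 3.
import Mathlib
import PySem

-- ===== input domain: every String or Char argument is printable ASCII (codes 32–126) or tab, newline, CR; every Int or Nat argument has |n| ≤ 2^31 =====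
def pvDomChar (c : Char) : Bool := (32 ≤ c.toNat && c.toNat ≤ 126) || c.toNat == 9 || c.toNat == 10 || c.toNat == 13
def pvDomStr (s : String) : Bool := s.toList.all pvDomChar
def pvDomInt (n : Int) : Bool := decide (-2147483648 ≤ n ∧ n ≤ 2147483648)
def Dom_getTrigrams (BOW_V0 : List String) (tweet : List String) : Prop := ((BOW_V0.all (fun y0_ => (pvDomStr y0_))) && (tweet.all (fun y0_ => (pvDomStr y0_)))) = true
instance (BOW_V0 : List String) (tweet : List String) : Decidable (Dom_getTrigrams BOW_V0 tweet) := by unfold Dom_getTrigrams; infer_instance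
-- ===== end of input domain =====

-- B replaces A's per-window triple membership test over the vocabulary list with a single pass
-- that builds a set once and maintains a running count of consecutive in-vocabulary tokens (faster).

-- ===== PORT A =====
-- while-loop over index i; tweet[i], tweet[i+1], tweet[i+2] are in range when read (i + 2 < len),
-- so List.getD is exact here; 'x in BOW_V0' is List.contains.
def getTrigramsGo (BOW_V0 : List String) (tweet : List String) (i : Nat)
    (acc : List (List String)) : List (List String) :=
  if i < tweet.length then
    if tweet.length ≤ i + 2 then acc
    else
      getTrigramsGo BOW_V0 tweet (i + 1)
        (if BOW_V0.contains (tweet.getD i "") && BOW_V0.contains (tweet.getD (i + 1) "")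
            && BOW_V0.contains (tweet.getD (i + 2) "") then
          acc ++ [[tweet.getD i "", tweet.getD (i + 1) "", tweet.getD (i + 2) ""]]
        else acc)
  else acc
termination_by tweet.length - i

def getTrigrams (BOW_V0 : List String) (tweet : List String) : List (List String) :=
  getTrigramsGo BOW_V0 tweet 0 []

-- ===== PORT B =====
-- fold over enumerate(tweet) carrying (run, trigrams); tweet[i-2], tweet[i-1] read only when
-- run ≥ 3 (so 0 ≤ i - 2), hence PySem.List.pyGetD is exact there.
def getTrigramsAltStep (vocab : PySem.Set String) (tweet : List String)
    (st : Nat × List (List String)) (p : Int × String) : Nat × List (List String) :=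
  let run := if vocab.contains p.2 then st.1 + 1 else 0
  (run,
    if 3 ≤ run then
      st.2 ++ [[PySem.List.pyGetD tweet (p.1 - 2) "", PySem.List.pyGetD tweet (p.1 - 1) "", p.2]]
    else st.2)

def getTrigrams_alt (BOW_V0 : List String) (tweet : List String) : List (List String) :=
  ((PySem.List.enumerate tweet).foldl
    (getTrigramsAltStep (PySem.Set.ofList BOW_V0) tweet) (0, [])).2

-- ===== PRECONDITION & SPEC =====
def Spec_getTrigrams (BOW_V0 : List String) (tweet : List String) (out : List (List String)) : Prop := out = getTrigrams_alt BOW_V0 tweet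
instance (BOW_V0 : List String) (tweet : List String) (out : List (List String)) : Decidable (Spec_getTrigrams BOW_V0 tweet out) := by unfold Spec_getTrigrams; infer_instance

-- ===== CLAIM (what is proved, stated in full; the proofs are below) =====
def Claim_equal_getTrigrams : Prop := ∀ (BOW_V0 : List String) (tweet : List String), Dom_getTrigrams BOW_V0 tweet → Spec_getTrigrams BOW_V0 tweet (getTrigrams BOW_V0 tweet)

-- ===== LEMMAS AND PROOFS =====

-- token membership test at position j
def memAt (V tweet : List String) (j : Nat) : Bool := V.contains (tweet.getD j "")

-- A's window value and test, by starting index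
def winAt (tweet : List String) (s : Nat) : List String :=
  [tweet.getD s "", tweet.getD (s + 1) "", tweet.getD (s + 2) ""]

def okAt (V tweet : List String) (s : Nat) : Bool :=
  memAt V tweet s && memAt V tweet (s + 1) && memAt V tweet (s + 2)

-- trigrams emitted by A from starting index i on
def specA (V tweet : List String) (i : Nat) : List (List String) :=
  (List.range' i (tweet.length - 2 - i)).filterMap
    (fun s => if okAt V tweet s then some (winAt tweet s) else none)

-- trigrams with ending index < m (B's order of emission)
def specB (V tweet : List String) (m : Nat) : List (List String) :=
  (List.range m).filterMap
    (fun e => if decide (2 ≤ e) && okAt V tweet (e - 2) then some (winAt tweet (e - 2)) else none)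

-- the run counter after the first m tokens
def runAt (V tweet : List String) : Nat → Nat
  | 0 => 0
  | m + 1 => if memAt V tweet m then runAt V tweet m + 1 else 0

lemma goA_eq (V tweet : List String) : ∀ (k i : Nat) (acc : List (List String)),
    tweet.length - i = k → getTrigramsGo V tweet i acc = acc ++ specA V tweet i := by
  intro k
  induction k with
  | zero =>
    intro i acc h
    rw [getTrigramsGo]
    have : ¬ i < tweet.length := by omega
    simp [this, specA, show tweet.length - 2 - i = 0 by omega]
  | succ k ih =>
    intro i acc h
    rw [getTrigramsGo]
    have hi : i < tweet.length := by omega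
    by_cases h2 : tweet.length ≤ i + 2
    · simp [hi, h2, specA, show tweet.length - 2 - i = 0 by omega]
    · have hd : tweet.length - 2 - i = (tweet.length - 2 - (i + 1)) + 1 := by omega
      simp only [hi, if_true, h2, if_false]
      rw [ih (i + 1) _ (by omega)]
      simp only [specA, hd, List.range'_succ, List.filterMap_cons, okAt, memAt, winAt]
      by_cases hc : (V.contains (tweet.getD i "") && V.contains (tweet.getD (i + 1) "")
          && V.contains (tweet.getD (i + 2) "")) = true
      · simp only [hc, if_true]; simp
      · simp only [Bool.not_eq_true] at hc
        simp only [hc, if_false, Bool.false_eq_true]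

lemma runAt_le (V tweet : List String) : ∀ m, runAt V tweet m ≤ m := by
  intro m
  induction m with
  | zero => simp [runAt]
  | succ m ih => by_cases h : memAt V tweet m <;> simp [runAt, h]
                 omega

lemma runAt_ge_one (V tweet : List String) (m : Nat) :
    1 ≤ runAt V tweet m ↔ 1 ≤ m ∧ memAt V tweet (m - 1) := by
  cases m with
  | zero => simp [runAt]
  | succ m => by_cases h : memAt V tweet m <;> simp [runAt, h]

lemma runAt_ge_two (V tweet : List String) (m : Nat) :
    2 ≤ runAt V tweet m ↔ 2 ≤ m ∧ memAt V tweet (m - 1) ∧ memAt V tweet (m - 2) := by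
  cases m with
  | zero => simp [runAt]
  | succ m =>
    by_cases h : memAt V tweet m
    · simp only [runAt, h, if_true]
      rw [show (2 ≤ runAt V tweet m + 1) ↔ (1 ≤ runAt V tweet m) by omega, runAt_ge_one]
      constructor
      · rintro ⟨h1, h2⟩
        exact ⟨by omega, by simpa using h, by simpa [Nat.succ_sub_one] using h2⟩
      · rintro ⟨h1, _, h2⟩
        exact ⟨by omega, by simpa [Nat.succ_sub_one] using h2⟩
    · simp [runAt, h]

lemma setContains_eq (V : List String) (x : String) :
    (PySem.Set.ofList V).contains x = V.contains x := by
  rw [PySem.Set.contains_eq_listContains]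
  simp [PySem.Set.mem_ofList]

lemma foldB_eq (V tweet : List String) : ∀ m, m ≤ tweet.length →
    (List.range m).foldl
      (fun st (j : Nat) => getTrigramsAltStep (PySem.Set.ofList V) tweet st ((j : Int), tweet.getD j ""))
      (0, []) = (runAt V tweet m, specB V tweet m) := by
  intro m
  induction m with
  | zero => intro _; simp [runAt, specB]
  | succ m ih =>
    intro hm
    rw [List.range_succ, List.foldl_append, ih (by omega)]
    simp only [List.foldl_cons, List.foldl_nil]
    have hrun : (if (PySem.Set.ofList V).contains (tweet.getD m "") then runAt V tweet m + 1 else 0)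
        = runAt V tweet (m + 1) := by
      rw [setContains_eq]
      rfl
    have hcond : (3 ≤ runAt V tweet (m + 1)) ↔
        (decide (2 ≤ m) && okAt V tweet (m - 2)) = true := by
      rw [show (3 ≤ runAt V tweet (m + 1)) ↔ (2 ≤ runAt V tweet m ∧ memAt V tweet m) by
            by_cases h : memAt V tweet m <;> simp [runAt, h],
          runAt_ge_two]
      by_cases h2 : 2 ≤ m
      · simp [okAt, h2, show m - 2 + 1 = m - 1 by omega, show m - 2 + 2 = m by omega]
        tauto
      · simp [h2]
    simp only [getTrigramsAltStep, hrun]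
    by_cases hc : 3 ≤ runAt V tweet (m + 1)
    · have h2m : 2 ≤ m := by
        have := runAt_le V tweet (m + 1); omega
      have : ((m : Int) - 2) = ((m - 2 : Nat) : Int) := by omega
      have h1 : ((m : Int) - 1) = ((m - 1 : Nat) : Int) := by omega
      simp only [hc, if_true, this, h1, PySem.List.pyGetD_natCast]
      refine Prod.ext rfl ?_
      simp only [specB, List.range_succ, List.filterMap_append, List.filterMap_cons]
      rw [if_pos (hcond.mp hc)]
      simp [winAt, show m - 2 + 1 = m - 1 by omega, show m - 2 + 2 = m by omega]
    · simp only [hc, if_false]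
      refine Prod.ext rfl ?_
      simp only [specB, List.range_succ, List.filterMap_append, List.filterMap_cons]
      rw [if_neg (fun h => hc (hcond.mpr h))]
      simp

lemma specB_eq_shift (V tweet : List String) : ∀ m,
    specB V tweet m = (List.range (m - 2)).filterMap
      (fun s => if okAt V tweet s then some (winAt tweet s) else none) := by
  intro m
  induction m with
  | zero => simp [specB]
  | succ m ih =>
    simp only [specB, List.range_succ, List.filterMap_append, List.filterMap_cons,
      List.filterMap_nil] at ih ⊢
    by_cases h2 : 2 ≤ m
    · have : m + 1 - 2 = (m - 2) + 1 := by omega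
      rw [this, List.range_succ, List.filterMap_append, List.filterMap_cons, List.filterMap_nil,
        ← ih]
      simp [h2]
    · have h0 : m + 1 - 2 = 0 := by omega
      have h0' : m - 2 = 0 := by omega
      rw [h0, ih, h0']
      simp [show ¬ (2 ≤ m) from h2]

lemma getTrigrams_alt_eq_specB (V tweet : List String) :
    getTrigrams_alt V tweet = specB V tweet tweet.length := by
  unfold getTrigrams_alt
  rw [PySem.List.enumerate_eq_map_pyRange tweet "", PySem.List.len,
    PySem.List.pyRange_zero_natCast, List.map_map, List.foldl_map]
  have : (fun st k => getTrigramsAltStep (PySem.Set.ofList V) tweet st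
        (((fun j => (j, PySem.List.pyGetD tweet j "")) ∘ fun k : Nat => (k : Int)) k))
      = (fun st (j : Nat) => getTrigramsAltStep (PySem.Set.ofList V) tweet st
        ((j : Int), tweet.getD j "")) := by
    funext st k
    simp [Function.comp, PySem.List.pyGetD_natCast]
  rw [this, foldB_eq V tweet tweet.length (le_refl _)]

-- ===== VERDICT (by name: the statement is the Claim_ definition above) =====
theorem getTrigrams_spec : Claim_equal_getTrigrams := by
  intro V tweet _
  unfold Spec_getTrigrams
  rw [getTrigrams, goA_eq V tweet (tweet.length - 0) 0 [] rfl,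
    getTrigrams_alt_eq_specB, specB_eq_shift]
  simp [specA, List.range_eq_range']
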